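-- pv_equiv track=rewrite | github.com/GARlMAN/leetcode | 2243-calculate-digit-sum-of-a-string/2243-calculate-digit-sum-of-a-string.py | digitSum
-- ===== SOURCE A (Python) =====
-- def digitSum(s: str, k: int) -> str:
--     ans = ""
--     j = 0
--     if len(s) <= k:
--         return s
--     while(len(s) > k):
--         ans = ""
--         a = 0
--         for index, i in enumerate(s):
--             if(index % k == 0 and index != 0):
--                 ans += str(a)
--                 a = 0
--             a += int(i)
--
--         ans += str(a)
--         s = ans
--         j += 1
--     return ans
-- ===== SOURCE B (Python) =====
-- def digitSum(s: str, k: int) -> str: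
--     if len(s) <= k:
--         return s
--     parts = []
--     i = 0
--     while i < len(s):
--         parts.append(str(sum(int(c) for c in s[i:i+k])))
--         i += k
--     return digitSum(''.join(parts), k)
-- ===== Notes on version B (the rewrite author's own statement) =====
-- stated objective: alternative
-- what changed: A's explicit while loop with an index%k flush-accumulator pass over enumerate(s) is replaced by recursion on the shrinking string with explicit slice-based chunking (sum each s[i:i+k] slice, join, recurse).
import Mathlib
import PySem

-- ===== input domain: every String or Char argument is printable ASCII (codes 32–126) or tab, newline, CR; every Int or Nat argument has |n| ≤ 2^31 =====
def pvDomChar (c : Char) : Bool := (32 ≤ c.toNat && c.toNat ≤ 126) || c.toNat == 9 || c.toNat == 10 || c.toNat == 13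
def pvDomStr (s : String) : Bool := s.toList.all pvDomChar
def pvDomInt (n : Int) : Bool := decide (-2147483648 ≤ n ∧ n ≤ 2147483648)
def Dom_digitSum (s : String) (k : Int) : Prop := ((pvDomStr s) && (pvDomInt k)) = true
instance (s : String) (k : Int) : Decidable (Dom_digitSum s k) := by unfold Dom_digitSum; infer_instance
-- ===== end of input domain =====

-- B replaces A's single index%k-accumulator pass and outer while loop by recursion on the
-- shrinking string with explicit slice-based chunking (objective: alternative decomposition).

-- int(c) for a one-character string (both Pythons do this; non-digits are outside Pre_)
def pvDigit (c : Char) : Int := (PySem.Int.ofChars? [c]).getD 0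

-- ===== PORT A =====
-- one step of A's `for index, i in enumerate(s)` body, state = (ans, a)
def pvStepA (k : Int) (st : List Char × Int) (p : Int × Char) : List Char × Int :=
  let st2 := if PySem.Int.mod p.1 k = 0 ∧ p.1 ≠ 0
             then (st.1 ++ PySem.Int.toChars st.2, 0) else st
  (st2.1, st2.2 + pvDigit p.2)

-- one iteration of A's while loop: ans = ""; a = 0; for …; ans += str(a)
def pvRoundA (k : Int) (s : List Char) : List Char :=
  let st := (PySem.List.enumerate s).foldl (pvStepA k) ([], 0)
  st.1 ++ PySem.Int.toChars st.2

-- A's `while len(s) > k` loop; fuel = initial length + 1 bounds the number of rounds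
-- (A returns `ans`, which equals the current `s` after each iteration)
def pvGoA (k : Int) : Nat → List Char → List Char → List Char
  | 0, _, ans => ans
  | n + 1, s, ans =>
      if k < (s.length : Int) then
        let a := pvRoundA k s
        pvGoA k n a a
      else ans

def digitSum (s : String) (k : Int) : String :=
  if (s.toList.length : Int) ≤ k then s
  else String.ofList (pvGoA k (s.toList.length + 1) s.toList [])

-- ===== PORT B =====
-- Source B's `while i < len(s)` slicing loop, as recursion on the remaining suffix:
-- each step emits str(sum(int(c) for c in s[i:i+k])) and advances i by k.
def pvChunks (k : Int) : List Char → List (List Char)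
  | [] => []
  | c :: rest =>
      if 1 ≤ k then
        PySem.Int.toChars (((c :: rest).take k.toNat).map pvDigit).sum
          :: pvChunks k ((c :: rest).drop k.toNat)
      else []   -- k ≤ 0: Source B's while loop never terminates; outside Pre_
  termination_by s => s.length
  decreasing_by simp; omega

-- Source B's recursion on the collapsed string; same fuel bound as A's loop
def pvGoB (k : Int) : Nat → List Char → List Char
  | 0, s => s
  | n + 1, s =>
      if k < (s.length : Int) then pvGoB k n (pvChunks k s).flatten else s

def digitSum_alt (s : String) (k : Int) : String :=
  if (s.toList.length : Int) ≤ k then s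
  else String.ofList (pvGoB k (s.toList.length + 1) s.toList)

-- ===== PRECONDITION & SPEC =====
-- Pre_ excludes exactly the inputs where A does not return: k ≤ 0 with len(s) > k raises
-- (ZeroDivisionError at index % 0, or diverges for k < 0), a non-digit char with len(s) > k
-- raises ValueError at int(i), and k = 1 with len(s) > 1 loops forever (each round returns s).
def Pre_digitSum (s : String) (k : Int) : Prop :=
  (s.toList.length : Int) ≤ k ∨ (2 ≤ k ∧ s.toList.all (fun c => c.isDigit) = true)
instance (s : String) (k : Int) : Decidable (Pre_digitSum s k) := by
  unfold Pre_digitSum; infer_instance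
def pvWitness_digitSum : String × Int := ("987654", 2)

def Spec_digitSum (s : String) (k : Int) (out : String) : Prop := out = digitSum_alt s k
instance (s : String) (k : Int) (out : String) : Decidable (Spec_digitSum s k out) := by
  unfold Spec_digitSum; infer_instance

-- ===== CLAIM (what is proved, stated in full; the proofs are below) =====
def Claim_equal_digitSum : Prop :=
  ∀ (s : String) (k : Int), Dom_digitSum s k → Pre_digitSum s k →
    Spec_digitSum s k (digitSum s k)

-- ===== LEMMAS AND PROOFS =====

-- interior of a chunk: no index is a multiple of k, so A's fold only accumulates `a`
theorem pvFold_no_flush (k : Int) (l : List Char) :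
    ∀ (i : Int) (st : List Char × Int),
      (∀ j : Nat, j < l.length → ¬ k ∣ (i + j)) →
      (PySem.List.enumerate l i).foldl (pvStepA k) st
        = (st.1, st.2 + (l.map pvDigit).sum) := by
  induction l with
  | nil => intro i st _; simp [PySem.List.enumerate_nil]
  | cons c rest ih =>
      intro i st h
      have h0 : ¬ k ∣ i := by simpa using h 0 (by simp)
      have hc : ¬ (PySem.Int.mod i k = 0 ∧ i ≠ 0) := by
        rw [PySem.Int.mod_eq_zero_iff_dvd]; tauto
      rw [PySem.List.enumerate_cons]
      simp only [List.foldl_cons]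
      rw [ih (i + 1) _ (fun j hj => by
        have := h (j + 1) (by simpa using Nat.succ_lt_succ hj)
        push_cast at this ⊢; ring_nf at this ⊢; exact this)]
      simp [pvStepA, hc, add_assoc]

-- after the head of a chunk at multiple-of-k index i has been consumed into `a`,
-- A's fold over the rest produces exactly B's chunk strings
theorem pvFold_after_head (k : Int) (hk : 1 ≤ k) :
    ∀ (rest : List Char) (i : Int) (ans : List Char) (a : Int),
      0 ≤ i → k ∣ i →
      (((PySem.List.enumerate rest (i + 1)).foldl (pvStepA k) (ans, a)).1
        ++ PySem.Int.toChars ((PySem.List.enumerate rest (i + 1)).foldl (pvStepA k) (ans, a)).2)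
      = ans ++ PySem.Int.toChars (a + ((rest.take (k.toNat - 1)).map pvDigit).sum)
          ++ (pvChunks k (rest.drop (k.toNat - 1))).flatten := by
  have main : ∀ (n : Nat) (rest : List Char), rest.length ≤ n → ∀ (i : Int) (ans : List Char) (a : Int),
      0 ≤ i → k ∣ i →
      (((PySem.List.enumerate rest (i + 1)).foldl (pvStepA k) (ans, a)).1
        ++ PySem.Int.toChars ((PySem.List.enumerate rest (i + 1)).foldl (pvStepA k) (ans, a)).2)
      = ans ++ PySem.Int.toChars (a + ((rest.take (k.toNat - 1)).map pvDigit).sum)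
          ++ (pvChunks k (rest.drop (k.toNat - 1))).flatten := by
    intro n
    induction n with
    | zero =>
        intro rest hle i ans a hi hdvd
        have hnil : rest = [] := List.eq_nil_of_length_eq_zero (by omega)
        subst hnil
        simp [PySem.List.enumerate_nil, pvChunks]
    | succ m ihn =>
        intro rest hle i ans a hi hdvd
        have hK : 1 ≤ k.toNat := by omega
        have hkK : (k.toNat : Int) = k := by omega
        by_cases hlen : rest.length ≤ k.toNat - 1
        · -- the whole remainder fits in the current chunk
          have htake : rest.take (k.toNat - 1) = rest := List.take_of_length_le hlen
          have hdrop : rest.drop (k.toNat - 1) = [] := List.drop_eq_nil_of_le hlen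
          rw [pvFold_no_flush k rest (i + 1) (ans, a) (fun j hj => by
            intro hd
            have h2 : (1 : Int) + j < k := by
              have : (j : Nat) < k.toNat - 1 := by omega
              omega
            have hd' : k ∣ (1 + (j : Int)) := by
              have hsub := dvd_sub hd hdvd
              have heq : i + 1 + (j : Int) - i = 1 + j := by ring
              rwa [heq] at hsub
            have := Int.le_of_dvd (by omega) hd'
            omega)]
          simp [htake, hdrop, pvChunks]
        · -- a full chunk of k-1 more chars, then the next chunk starts at index i+k
          rw [not_le] at hlen
          obtain ⟨pre, d, rest', hpre, hsplit⟩ :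
              ∃ pre d rest', pre.length = k.toNat - 1 ∧ rest = pre ++ d :: rest' := by
            have h1 : k.toNat - 1 < rest.length := hlen
            refine ⟨rest.take (k.toNat - 1), rest[k.toNat - 1], rest.drop (k.toNat - 1 + 1), ?_, ?_⟩
            · simp [List.length_take]; omega
            · rw [← List.drop_eq_getElem_cons h1, List.take_append_drop]
          subst hsplit
          rw [PySem.List.enumerate_append, List.foldl_append]
          rw [pvFold_no_flush k pre (i + 1) (ans, a) (fun j hj => by
            intro hd
            have h2 : (1 : Int) + j < k := by
              have : (j : Nat) < k.toNat - 1 := hpre ▸ hj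
              omega
            have hd' : k ∣ (1 + (j : Int)) := by
              have hsub := dvd_sub hd hdvd
              have heq : i + 1 + (j : Int) - i = 1 + j := by ring
              rwa [heq] at hsub
            have := Int.le_of_dvd (by omega) hd'
            omega)]
          -- the next element d sits at index i + 1 + pre.length = i + k : flush fires
          rw [PySem.List.enumerate_cons]
          simp only [List.foldl_cons]
          have hidx : i + 1 + (pre.length : Int) = i + k := by rw [hpre]; omega
          have hdvd' : k ∣ (i + k) := (Int.dvd_add_right hdvd).mpr dvd_rfl
          have hne : i + k ≠ 0 := by
            rcases hdvd with ⟨m, rfl⟩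
            intro h0
            have : k * (m + 1) = 0 := by ring_nf; ring_nf at h0; linarith
            have := mul_eq_zero.mp this
            omega
          have hc : (PySem.Int.mod (i + 1 + (pre.length : Int)) k = 0 ∧ i + 1 + (pre.length : Int) ≠ 0) := by
            rw [hidx, PySem.Int.mod_eq_zero_iff_dvd]; exact ⟨hdvd', hne⟩
          show _ = _
          rw [show pvStepA k (ans, a + (pre.map pvDigit).sum) (i + 1 + (pre.length:Int), d)
                = (ans ++ PySem.Int.toChars (a + (pre.map pvDigit).sum), 0 + pvDigit d) by
            simp [pvStepA, hc]]
          rw [show i + 1 + (pre.length : Int) + 1 = (i + k) + 1 by omega]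
          rw [ihn rest' (by simp [hpre] at hle ⊢; omega) (i + k) _ _ (by omega) hdvd']
          have htake : (pre ++ d :: rest').take (k.toNat - 1) = pre := by
            rw [List.take_append_of_le_length (le_of_eq hpre.symm), ← hpre]; simp
          have hdrop : (pre ++ d :: rest').drop (k.toNat - 1) = d :: rest' := by
            rw [List.drop_append_of_le_length (le_of_eq hpre.symm), ← hpre]; simp
          rw [htake, hdrop]
          have hchunk : pvChunks k (d :: rest')
              = PySem.Int.toChars (pvDigit d + ((rest'.take (k.toNat - 1)).map pvDigit).sum)
                  :: pvChunks k (rest'.drop (k.toNat - 1)) := by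
            rw [pvChunks]
            have ht : (d :: rest').take k.toNat = d :: rest'.take (k.toNat - 1) := by
              rw [show k.toNat = (k.toNat - 1) + 1 by omega]; simp
            have hd2 : (d :: rest').drop k.toNat = rest'.drop (k.toNat - 1) := by
              rw [show k.toNat = (k.toNat - 1) + 1 by omega]; simp
            simp [hk, ht, hd2]
          rw [hchunk]
          simp [List.append_assoc]
  exact fun rest => main rest.length rest le_rfl

-- one round: A's accumulator pass over a nonempty string = B's chunk strings, joined
theorem pvRound_eq (k : Int) (hk : 1 ≤ k) (c : Char) (rest : List Char) :
    pvRoundA k (c :: rest) = (pvChunks k (c :: rest)).flatten := by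
  unfold pvRoundA
  rw [PySem.List.enumerate_cons]
  simp only [List.foldl_cons]
  rw [show pvStepA k ([], 0) (0, c) = ([], 0 + pvDigit c) by simp [pvStepA]]
  rw [pvFold_after_head k hk rest 0 [] (0 + pvDigit c) le_rfl (dvd_zero k)]
  have hchunk : pvChunks k (c :: rest)
      = PySem.Int.toChars ((((c :: rest).take k.toNat).map pvDigit).sum)
          :: pvChunks k ((c :: rest).drop k.toNat) := by
    rw [pvChunks]; simp [hk]
  have ht : (c :: rest).take k.toNat = c :: rest.take (k.toNat - 1) := by
    rw [show k.toNat = (k.toNat - 1) + 1 by omega]; simp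
  have hd2 : (c :: rest).drop k.toNat = rest.drop (k.toNat - 1) := by
    rw [show k.toNat = (k.toNat - 1) + 1 by omega]; simp
  rw [hchunk, ht, hd2]
  simp

-- the two outer loops agree once A's `ans` equals the current string
theorem pvGo_eq (k : Int) (hk : 1 ≤ k) :
    ∀ (n : Nat) (s : List Char), pvGoA k n s s = pvGoB k n s := by
  intro n
  induction n with
  | zero => intro s; rfl
  | succ m ih =>
      intro s
      rw [pvGoA, pvGoB]
      by_cases h : k < (s.length : Int)
      · rw [if_pos h, if_pos h]
        match s, h with
        | [], h => simp at h; omega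
        | c :: rest, h => rw [pvRound_eq k hk c rest]; exact ih _
      · rw [if_neg h, if_neg h]

-- ===== VERDICT (by name: the statement is the Claim_ definition above) =====
theorem digitSum_spec : Claim_equal_digitSum := by
  intro s k _ hpre
  unfold Spec_digitSum digitSum digitSum_alt
  by_cases hle : (s.toList.length : Int) ≤ k
  · rw [if_pos hle, if_pos hle]
  · rw [if_neg hle, if_neg hle]
    have hk : 1 ≤ k := by
      rcases hpre with h | ⟨h2, _⟩
      · exact absurd h hle
      · omega
    have hlt : k < (s.toList.length : Int) := by omega
    rw [pvGoA, pvGoB, if_pos hlt, if_pos hlt]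
    match s.toList, hlt with
    | [], hlt => simp at hlt; omega
    | c :: rest, hlt =>
        rw [pvRound_eq k hk c rest]
        rw [pvGo_eq k hk]
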